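-- pv_equiv track=rewrite | github.com/Joentze/IS469-research | retrieval/agentic/hyde.py | enforce_chunk_size_rules
-- ===== SOURCE A (Python) =====
-- MAX_SENTENCES_PER_CHUNK = 6
--
-- MIN_SENTENCES_PER_CHUNK = 2
--
-- def _normalize_breakpoints(raw_breakpoints: list[int], sentence_count: int) -> list[int]:
--     if sentence_count <= 1:
--         return []
--     return sorted({idx for idx in raw_breakpoints if 0 <= idx < sentence_count - 1})
--
-- def _fallback_breakpoints(sentence_count: int) -> list[int]:
--     if sentence_count <= MAX_SENTENCES_PER_CHUNK:
--         return []
--     breaks: list[int] = []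
--     idx = MAX_SENTENCES_PER_CHUNK - 1
--     while idx < sentence_count - 1:
--         breaks.append(idx)
--         idx += MAX_SENTENCES_PER_CHUNK
--     return breaks
--
-- def enforce_chunk_size_rules(breaks: list[int], sentence_count: int) -> list[int]:
--     if sentence_count <= 1:
--         return []
--     all_breaks = _normalize_breakpoints(breaks, sentence_count)
--     if not all_breaks:
--         return _fallback_breakpoints(sentence_count)
--
--     filtered: list[int] = []
--     start = 0
--     for brk in all_breaks:
--         if brk - start + 1 >= MIN_SENTENCES_PER_CHUNK:
--             filtered.append(brk)
--             start = brk + 1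
--
--     with_caps: list[int] = []
--     start = 0
--     for brk in filtered + [sentence_count - 1]:
--         while brk - start + 1 > MAX_SENTENCES_PER_CHUNK:
--             cap = start + MAX_SENTENCES_PER_CHUNK - 1
--             if cap < sentence_count - 1:
--                 with_caps.append(cap)
--             start = cap + 1
--         if brk < sentence_count - 1:
--             with_caps.append(brk)
--         start = brk + 1
--
--     return _normalize_breakpoints(with_caps, sentence_count)
-- ===== SOURCE B (Python) =====
-- MAX_SENTENCES_PER_CHUNK = 6
--
-- MIN_SENTENCES_PER_CHUNK = 2
--
-- def _normalize_breakpoints(raw_breakpoints: list[int], sentence_count: int) -> list[int]: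
--     if sentence_count <= 1:
--         return []
--     return sorted({idx for idx in raw_breakpoints if 0 <= idx < sentence_count - 1})
--
-- def _fallback_breakpoints(sentence_count: int) -> list[int]:
--     if sentence_count <= MAX_SENTENCES_PER_CHUNK:
--         return []
--     breaks: list[int] = []
--     idx = MAX_SENTENCES_PER_CHUNK - 1
--     while idx < sentence_count - 1:
--         breaks.append(idx)
--         idx += MAX_SENTENCES_PER_CHUNK
--     return breaks
--
-- def _emit_caps(limit: int, start: int, out: list[int]) -> int:
--     # emit cap breakpoints while the span [start, limit] exceeds the max size
--     while limit - start + 1 > MAX_SENTENCES_PER_CHUNK: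
--         cap = start + MAX_SENTENCES_PER_CHUNK - 1
--         out.append(cap)
--         start = cap + 1
--     return start
--
-- def enforce_chunk_size_rules(breaks: list[int], sentence_count: int) -> list[int]:
--     if sentence_count <= 1:
--         return []
--     all_breaks = _normalize_breakpoints(breaks, sentence_count)
--     if not all_breaks:
--         return _fallback_breakpoints(sentence_count)
--     # single greedy left-to-right sweep fusing the min-filter and max-cap passes
--     out: list[int] = []
--     start = 0
--     for brk in all_breaks:
--         if brk - start + 1 >= MIN_SENTENCES_PER_CHUNK:
--             _emit_caps(brk, start, out)
--             out.append(brk)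
--             start = brk + 1
--     _emit_caps(sentence_count - 1, start, out)
--     return _normalize_breakpoints(out, sentence_count)
-- ===== Notes on version B (the rewrite author's own statement) =====
-- stated objective: simpler
-- what changed: Fuses A's two sequential passes (min-size filter, then max-size capping over the filtered list plus sentinel) into one greedy left-to-right sweep with a single start cursor, dropping the guard 'cap < sentence_count - 1' that is provably vacuous.
import Mathlib
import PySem

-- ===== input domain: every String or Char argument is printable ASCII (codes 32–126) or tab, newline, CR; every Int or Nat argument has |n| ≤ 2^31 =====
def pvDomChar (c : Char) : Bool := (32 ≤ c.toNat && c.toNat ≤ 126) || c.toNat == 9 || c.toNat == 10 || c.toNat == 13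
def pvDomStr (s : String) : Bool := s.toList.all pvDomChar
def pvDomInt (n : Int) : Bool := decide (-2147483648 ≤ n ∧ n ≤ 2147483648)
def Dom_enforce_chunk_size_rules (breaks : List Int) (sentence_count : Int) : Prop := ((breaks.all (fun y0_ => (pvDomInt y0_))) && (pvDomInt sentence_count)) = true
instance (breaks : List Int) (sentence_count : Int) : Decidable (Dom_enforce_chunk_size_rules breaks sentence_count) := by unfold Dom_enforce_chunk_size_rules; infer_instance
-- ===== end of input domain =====

-- B fuses A's min-filter pass and max-cap pass into one greedy sweep (objective: simpler, one pass instead of two).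

-- ===== PORT A =====
-- _normalize_breakpoints: sorted({idx for idx in raw if 0 <= idx < sentence_count - 1})
def pvNormalize (raw : List Int) (sc : Int) : List Int :=
  if sc ≤ 1 then []
  else PySem.List.sorted (PySem.Set.ofList (raw.filter (fun idx => decide (0 ≤ idx ∧ idx < sc - 1)))) (fun x => x) false

-- while loop of _fallback_breakpoints
def pvFallbackLoop (sc : Int) (idx : Int) (breaks : List Int) : List Int :=
  if idx < sc - 1 then pvFallbackLoop sc (idx + 6) (breaks ++ [idx]) else breaks
termination_by (sc - 1 - idx).toNat
decreasing_by simp_wf; omega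

def pvFallback (sc : Int) : List Int :=
  if sc ≤ 6 then [] else pvFallbackLoop sc 5 []

-- A's first for-loop (min-size filter), state (start, filtered)
def pvFilterLoop : List Int → Int → List Int → List Int
  | [], _, filtered => filtered
  | brk :: rest, start, filtered =>
      if brk - start + 1 ≥ 2 then pvFilterLoop rest (brk + 1) (filtered ++ [brk])
      else pvFilterLoop rest start filtered

-- the inner while loop of A's second for-loop
def pvCapWhileA (sc brk : Int) (start : Int) (acc : List Int) : Int × List Int :=
  if brk - start + 1 > 6 then
    pvCapWhileA sc brk (start + 5 + 1) (if start + 5 < sc - 1 then acc ++ [start + 5] else acc)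
  else (start, acc)
termination_by (brk - start).toNat
decreasing_by simp_wf; omega

-- A's second for-loop (max-size cap), over filtered ++ [sentence_count - 1]
def pvCapPass (sc : Int) : List Int → Int → List Int → List Int
  | [], _, acc => acc
  | brk :: rest, start, acc =>
      pvCapPass sc rest (brk + 1)
        (if brk < sc - 1 then (pvCapWhileA sc brk start acc).2 ++ [brk] else (pvCapWhileA sc brk start acc).2)

def enforce_chunk_size_rules (breaks : List Int) (sentence_count : Int) : List Int :=
  if sentence_count ≤ 1 then []
  else
    let all_breaks := pvNormalize breaks sentence_count
    if all_breaks = [] then pvFallback sentence_count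
    else
      let filtered := pvFilterLoop all_breaks 0 []
      let with_caps := pvCapPass sentence_count (filtered ++ [sentence_count - 1]) 0 []
      pvNormalize with_caps sentence_count

-- ===== PORT B =====
-- _emit_caps: emit cap breakpoints while the span [start, limit] exceeds the max size
def pvEmitCaps (limit : Int) (start : Int) (out : List Int) : Int × List Int :=
  if limit - start + 1 > 6 then pvEmitCaps limit (start + 6) (out ++ [start + 5])
  else (start, out)
termination_by (limit - start).toNat
decreasing_by simp_wf; omega

-- B's single greedy sweep with one start cursor; the tail is capped without appending sc-1
def pvSweep (sc : Int) : List Int → Int → List Int → List Int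
  | [], start, out => (pvEmitCaps (sc - 1) start out).2
  | brk :: rest, start, out =>
      if brk - start + 1 ≥ 2 then
        pvSweep sc rest (brk + 1) ((pvEmitCaps brk start out).2 ++ [brk])
      else pvSweep sc rest start out

def enforce_chunk_size_rules_alt (breaks : List Int) (sentence_count : Int) : List Int :=
  if sentence_count ≤ 1 then []
  else
    let all_breaks := pvNormalize breaks sentence_count
    if all_breaks = [] then pvFallback sentence_count
    else pvNormalize (pvSweep sentence_count all_breaks 0 []) sentence_count

-- ===== PRECONDITION & SPEC =====
def Spec_enforce_chunk_size_rules (breaks : List Int) (sentence_count : Int) (out : List Int) : Prop := out = enforce_chunk_size_rules_alt breaks sentence_count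
instance (breaks : List Int) (sentence_count : Int) (out : List Int) : Decidable (Spec_enforce_chunk_size_rules breaks sentence_count out) := by unfold Spec_enforce_chunk_size_rules; infer_instance

-- ===== CLAIM (what is proved, stated in full; the proofs are below) =====
def Claim_equal_enforce_chunk_size_rules : Prop := ∀ (breaks : List Int) (sentence_count : Int), Dom_enforce_chunk_size_rules breaks sentence_count → Spec_enforce_chunk_size_rules breaks sentence_count (enforce_chunk_size_rules breaks sentence_count)

-- ===== LEMMAS AND PROOFS =====

-- A's cap while-loop equals B's _emit_caps once brk ≤ sc - 1 (then the guard 'cap < sc - 1' always holds)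
theorem capA_eq_emit (sc brk : Int) (h : brk ≤ sc - 1) :
    ∀ start acc, pvCapWhileA sc brk start acc = pvEmitCaps brk start acc := by
  intro start
  induction hn : (brk - start).toNat using Nat.strong_induction_on generalizing start with
  | _ n ih =>
    intro acc
    rw [pvCapWhileA, pvEmitCaps]
    by_cases hc : brk - start + 1 > 6
    · have hcap : start + 5 < sc - 1 := by omega
      simp only [hc, if_pos, hcap]
      have : start + 5 + 1 = start + 6 := by omega
      rw [this]
      exact ih (brk - (start + 6)).toNat (by omega) (start + 6) rfl _
    · simp [hc]

-- the filter loop's accumulator prefixes the result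
theorem filterLoop_acc (l : List Int) : ∀ s acc, pvFilterLoop l s acc = acc ++ pvFilterLoop l s [] := by
  induction l with
  | nil => intro s acc; simp [pvFilterLoop]
  | cons b rest ih =>
    intro s acc
    by_cases hc : b - s + 1 ≥ 2
    · simp only [pvFilterLoop, if_pos hc, List.nil_append]
      rw [ih (b + 1) (acc ++ [b]), ih (b + 1) [b]]
      simp
    · simp only [pvFilterLoop, if_neg hc]
      exact ih s acc

-- the fusion: filter pass followed by cap pass (with the sentinel) equals one sweep
theorem fusion (sc : Int) (l : List Int) (hmem : ∀ b ∈ l, b < sc - 1) :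
    ∀ s acc, pvCapPass sc (pvFilterLoop l s [] ++ [sc - 1]) s acc = pvSweep sc l s acc := by
  induction l with
  | nil =>
    intro s acc
    simp [pvFilterLoop, pvCapPass, pvSweep, capA_eq_emit sc (sc - 1) (le_refl _) s acc]
  | cons b rest ih =>
    have hb : b < sc - 1 := hmem b (List.mem_cons_self ..)
    have hrest : ∀ x ∈ rest, x < sc - 1 := fun x hx => hmem x (List.mem_cons_of_mem _ hx)
    intro s acc
    by_cases hc : b - s + 1 ≥ 2
    · simp only [pvFilterLoop, if_pos hc, List.nil_append]
      rw [filterLoop_acc rest (b + 1) [b]]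
      simp only [List.nil_append, List.cons_append]
      simp only [pvCapPass, if_pos hb]
      rw [capA_eq_emit sc b (by omega) s acc]
      simp only [pvSweep, if_pos hc]
      exact ih hrest (b + 1) ((pvEmitCaps b s acc).2 ++ [b])
    · simp only [pvFilterLoop, pvSweep, if_neg hc]
      exact ih hrest s acc

-- every normalized breakpoint is < sentence_count - 1
theorem normalize_mem (raw : List Int) (sc : Int) : ∀ b ∈ pvNormalize raw sc, b < sc - 1 := by
  intro b hb
  unfold pvNormalize at hb
  split at hb
  · simp at hb
  · rw [PySem.List.mem_sorted, PySem.Set.mem_ofList, List.mem_filter] at hb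
    have := hb.2
    simp at this
    omega

-- ===== VERDICT (by name: the statement is the Claim_ definition above) =====
theorem enforce_chunk_size_rules_spec : Claim_equal_enforce_chunk_size_rules := by
  intro breaks sc _
  unfold Spec_enforce_chunk_size_rules enforce_chunk_size_rules enforce_chunk_size_rules_alt
  by_cases h1 : sc ≤ 1
  · simp [h1]
  · simp only [if_neg h1]
    by_cases h2 : pvNormalize breaks sc = []
    · simp [h2]
    · simp only [if_neg h2]
      rw [fusion sc (pvNormalize breaks sc) (normalize_mem breaks sc) 0 []]
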